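-- pv_equiv track=rewrite | github.com/ausmaster/blazeweb | tests/test_real_sites.py | compute_tag_similarity
-- ===== SOURCE A (Python) =====
-- from collections import Counter
--
-- def compute_tag_similarity(seq1: list[str], seq2: list[str]) -> tuple[int, int]:
--     """Counter-based tag frequency similarity."""
--     if not seq1 or not seq2:
--         return 0, max(len(seq1), len(seq2))
--     c1 = Counter(seq1)
--     c2 = Counter(seq2)
--     all_tags = set(c1) | set(c2)
--     matching = sum(min(c1.get(t, 0), c2.get(t, 0)) for t in all_tags)
--     total = max(len(seq1), len(seq2))
--     return matching, total
-- ===== SOURCE B (Python) =====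
-- from collections import Counter
--
-- def compute_tag_similarity(seq1: list[str], seq2: list[str]) -> tuple[int, int]:
--     """Single-counter greedy consumption instead of two Counters + union-of-keys sum."""
--     if not seq1 or not seq2:
--         return 0, max(len(seq1), len(seq2))
--     total = max(len(seq1), len(seq2))
--     c1 = Counter(seq1)
--     matching = 0
--     for t in seq2:
--         if c1.get(t, 0) > 0:
--             matching += 1
--             c1[t] -= 1
--     return matching, total
-- ===== Notes on version B (the rewrite author's own statement) =====
-- stated objective: alternative
-- what changed: Replaces the two-Counter / union-of-keys / sum-of-mins computation by a single Counter of seq1 and one greedy decrementing pass over seq2 that counts consumable matches.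
import Mathlib
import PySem

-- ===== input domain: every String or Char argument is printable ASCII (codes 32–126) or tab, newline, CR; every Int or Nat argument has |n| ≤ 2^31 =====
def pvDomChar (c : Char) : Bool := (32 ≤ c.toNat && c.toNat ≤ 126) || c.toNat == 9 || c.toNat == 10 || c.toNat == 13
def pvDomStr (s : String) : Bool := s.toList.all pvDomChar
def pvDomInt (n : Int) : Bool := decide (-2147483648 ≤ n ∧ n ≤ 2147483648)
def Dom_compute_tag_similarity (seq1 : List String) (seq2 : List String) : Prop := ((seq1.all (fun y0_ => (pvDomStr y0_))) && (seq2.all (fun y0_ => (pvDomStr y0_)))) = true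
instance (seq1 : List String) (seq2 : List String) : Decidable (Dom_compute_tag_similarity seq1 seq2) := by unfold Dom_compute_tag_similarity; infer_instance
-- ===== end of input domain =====

-- B replaces A's two Counters + union-of-keys sum-of-mins by one Counter of seq1 and a
-- single greedy decrementing pass over seq2 (alternative decomposition, same cost class).

-- ===== PORT A =====
def compute_tag_similarity (seq1 : List String) (seq2 : List String) : Int × Int :=
  if seq1 = [] ∨ seq2 = [] then (0, max (seq1.length : Int) (seq2.length : Int))
  else
    let c1 : PySem.Dict String Int := PySem.Dict.counter seq1
    let c2 : PySem.Dict String Int := PySem.Dict.counter seq2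
    let all_tags : PySem.Set String :=
      PySem.Set.union (PySem.Set.ofList c1.keys) (PySem.Set.ofList c2.keys)
    let matching : Int := (all_tags.map (fun t => min (c1.getD t 0) (c2.getD t 0))).sum
    let total : Int := max (seq1.length : Int) (seq2.length : Int)
    (matching, total)

-- ===== PORT B =====
def compute_tag_similarity_alt (seq1 : List String) (seq2 : List String) : Int × Int :=
  if seq1 = [] ∨ seq2 = [] then (0, max (seq1.length : Int) (seq2.length : Int))
  else
    let total : Int := max (seq1.length : Int) (seq2.length : Int)
    let c1 : PySem.Dict String Int := PySem.Dict.counter seq1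
    let st : Int × PySem.Dict String Int :=
      seq2.foldl (fun st t =>
        if st.2.getD t 0 > 0 then (st.1 + 1, st.2.modify t 0 (· - 1)) else st) (0, c1)
    (st.1, total)

-- ===== PRECONDITION & SPEC =====
def Spec_compute_tag_similarity (seq1 : List String) (seq2 : List String) (out : Int × Int) : Prop := out = compute_tag_similarity_alt seq1 seq2
instance (seq1 : List String) (seq2 : List String) (out : Int × Int) : Decidable (Spec_compute_tag_similarity seq1 seq2 out) := by unfold Spec_compute_tag_similarity; infer_instance

-- ===== CLAIM (what is proved, stated in full; the proofs are below) =====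
def Claim_equal_compute_tag_similarity : Prop := ∀ (seq1 : List String) (seq2 : List String), Dom_compute_tag_similarity seq1 seq2 → Spec_compute_tag_similarity seq1 seq2 (compute_tag_similarity seq1 seq2)

-- ===== LEMMAS AND PROOFS =====

-- pure functional mirror of B's greedy pass: remaining budget f, count of consumed matches
def gsum (f : String → Int) : List String → Int
  | [] => 0
  | t :: l => if f t > 0 then 1 + gsum (fun s => if s = t then f t - 1 else f s) l
              else gsum f l

lemma foldl_fst (l : List String) : ∀ (d : PySem.Dict String Int) (m : Int),
    (l.foldl (fun (st : Int × PySem.Dict String Int) t =>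
        if st.2.getD t 0 > 0 then (st.1 + 1, st.2.modify t 0 (· - 1)) else st) (m, d)).1
      = m + gsum (fun t => d.getD t 0) l := by
  induction l with
  | nil => intro d m; simp [gsum]
  | cons t l ih =>
    intro d m
    simp only [List.foldl_cons, gsum]
    by_cases h : d.getD t 0 > 0
    · rw [if_pos h, if_pos h, ih]
      have hf : (fun s => (d.modify t 0 (· - 1)).getD s 0)
          = (fun s => if s = t then d.getD t 0 - 1 else d.getD s 0) := by
        funext s; rw [PySem.Dict.getD_modify]
      rw [hf]; ring
    · rw [if_neg h, if_neg h, ih]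

lemma gsum_eq_sum (l : List String) : ∀ (f : String → Int) (S : Finset String),
    (∀ t, 0 ≤ f t) → (∀ t ∈ l, t ∈ S) →
    gsum f l = ∑ t ∈ S, min (f t) (l.count t : Int) := by
  induction l with
  | nil =>
    intro f S h0 _
    simp only [gsum, List.count_nil]
    exact (Finset.sum_eq_zero fun t _ => by
      have := h0 t; simp [min_def]; omega).symm
  | cons t l ih =>
    intro f S h0 hc
    have htS : t ∈ S := hc t (by simp)
    by_cases h : f t > 0
    · rw [show gsum f (t :: l)
          = 1 + gsum (fun s => if s = t then f t - 1 else f s) l from by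
        simp [gsum, h]]
      rw [ih (fun s => if s = t then f t - 1 else f s) S
          (fun s => by
            show 0 ≤ if s = t then f t - 1 else f s
            split_ifs with hs
            · omega
            · exact h0 s)
          (fun s hs => hc s (List.mem_cons_of_mem _ hs))]
      rw [← Finset.add_sum_erase S _ htS, ← Finset.add_sum_erase S
          (fun s => min (f s) ((t :: l).count s : Int)) htS]
      have hrest : ∑ s ∈ S.erase t, min (if s = t then f t - 1 else f s) ((l.count s : Int))
          = ∑ s ∈ S.erase t, min (f s) (((t :: l).count s : Int)) := by
        refine Finset.sum_congr rfl fun s hs => ?_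
        have hne : s ≠ t := (Finset.mem_erase.mp hs).1
        have : (t :: l).count s = l.count s := by
          simp [Ne.symm hne]
        rw [this, if_neg hne]
      rw [hrest]
      have hhead : (1 : Int) + min (f t - 1) (l.count t : Int)
          = min (f t) (((t :: l).count t : Int)) := by
        have : (t :: l).count t = l.count t + 1 := by simp
        rw [this]; push_cast; rw [min_def, min_def]; split_ifs <;> omega
      rw [if_pos rfl, ← hhead]; ring
    · have hz : f t = 0 := le_antisymm (by omega) (h0 t)
      rw [show gsum f (t :: l) = gsum f l from by simp [gsum, h]]
      rw [ih f S h0 (fun s hs => hc s (List.mem_cons_of_mem _ hs))]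
      refine Finset.sum_congr rfl fun s hs => ?_
      by_cases hst : s = t
      · subst hst
        have h1 : (s :: l).count s = l.count s + 1 := by simp
        rw [hz, h1]; push_cast
        rw [min_def, min_def]; split_ifs <;> omega
      · have hts : t ≠ s := fun e => hst e.symm
        have : (t :: l).count s = l.count s := by simp [hts]
        rw [this]

lemma matching_eq (seq1 seq2 : List String) :
    ((PySem.Set.union (PySem.Set.ofList (PySem.Dict.counter seq1).keys)
        (PySem.Set.ofList (PySem.Dict.counter seq2).keys)).map
        (fun t => min ((PySem.Dict.counter seq1).getD t 0) ((PySem.Dict.counter seq2).getD t 0))).sum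
      = (seq2.foldl (fun (st : Int × PySem.Dict String Int) t =>
          if st.2.getD t 0 > 0 then (st.1 + 1, st.2.modify t 0 (· - 1)) else st)
          (0, PySem.Dict.counter seq1)).1 := by
  have hk1 : (PySem.Dict.counter seq1).keys = PySem.Set.ofList seq1 := by
    simp [pysem]
  have hk2 : (PySem.Dict.counter seq2).keys = PySem.Set.ofList seq2 := by
    simp [pysem]
  set L : PySem.Set String :=
    PySem.Set.union (PySem.Set.ofList (PySem.Dict.counter seq1).keys)
      (PySem.Set.ofList (PySem.Dict.counter seq2).keys) with hL
  have hnd : L.Nodup := PySem.Set.nodup_union _ _ (PySem.Set.nodup_ofList _)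
  have hmem : ∀ t, t ∈ L ↔ t ∈ seq1 ∨ t ∈ seq2 := by
    intro t
    rw [hL, PySem.Set.mem_union, hk1, hk2]
    simp [PySem.Set.mem_ofList]
  -- B side: fold = gsum, gsum = Finset sum over L.toFinset
  rw [foldl_fst seq2 (PySem.Dict.counter seq1) 0, zero_add]
  have hf : (fun t => (PySem.Dict.counter seq1).getD t 0)
      = fun t => (seq1.count t : Int) := funext fun t => by simp [pysem]
  rw [hf, gsum_eq_sum seq2 _ L.toFinset (fun t => Int.natCast_nonneg _)
      (fun t ht => List.mem_toFinset.mpr ((hmem t).mpr (Or.inr ht)))]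
  -- A side: nodup list sum = Finset sum
  rw [← List.sum_toFinset _ hnd]
  refine Finset.sum_congr rfl fun t _ => ?_
  simp [pysem]

-- ===== VERDICT (by name: the statement is the Claim_ definition above) =====
theorem compute_tag_similarity_spec : Claim_equal_compute_tag_similarity := by
  intro seq1 seq2 _
  unfold Spec_compute_tag_similarity
  by_cases hg : seq1 = [] ∨ seq2 = []
  · simp only [compute_tag_similarity, compute_tag_similarity_alt, if_pos hg]
  · simp only [compute_tag_similarity, compute_tag_similarity_alt, if_neg hg]
    rw [matching_eq seq1 seq2]
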